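-- pv_equiv track=rewrite | github.com/LockyYud/SpellingCorrect | Tokenizer.py | run_split_on_punc
-- ===== SOURCE A (Python) =====
-- import unicodedata
--
-- def run_split_on_punc(text):
--     """Splits punctuation on a piece of text."""
--     chars = list(text)
--     i = 0
--     start_new_word = True
--     output = []
--     while i < len(chars):
--         char = chars[i]
--         if _is_punctuation(char):
--             output.append([char])
--             start_new_word = True
--         else:
--             if start_new_word:
--                 output.append([])
--             start_new_word = False
--             output[-1].append(char)
--         i += 1
--
--     return ["".join(x) for x in output]
--
-- def _is_punctuation(char):
--     """Checks whether `chars` is a punctuation character."""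
--     cp = ord(char)
--     # We treat all non-letter/number ASCII as punctuation.
--     # Characters such as "^", "$", and "`" are not in the Unicode
--     # Punctuation class but we treat them as punctuation anyways, for
--     # consistency.
--     if (
--         (cp >= 33 and cp <= 47)
--         or (cp >= 58 and cp <= 64)
--         or (cp >= 91 and cp <= 96)
--         or (cp >= 123 and cp <= 126)
--     ):
--         return True
--     cat = unicodedata.category(char)
--     if cat.startswith("P"):
--         return True
--     return False
-- ===== SOURCE B (Python) =====
-- import unicodedata
-- from itertools import groupby
--
--
-- def _is_punctuation(char):
--     """Checks whether `chars` is a punctuation character."""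
--     cp = ord(char)
--     if (
--         (cp >= 33 and cp <= 47)
--         or (cp >= 58 and cp <= 64)
--         or (cp >= 91 and cp <= 96)
--         or (cp >= 123 and cp <= 126)
--     ):
--         return True
--     cat = unicodedata.category(char)
--     if cat.startswith("P"):
--         return True
--     return False
--
--
-- def run_split_on_punc(text):
--     """Splits punctuation on a piece of text."""
--     output = []
--     for is_punct, run in groupby(text, key=_is_punctuation):
--         if is_punct:
--             output.extend(run)
--         else:
--             output.append("".join(run))
--     return output
-- ===== Notes on version B (the rewrite author's own statement) =====
-- stated objective: idiomatic
-- what changed: Replaces the index loop with manual start_new_word state and in-place append to output[-1] by an itertools.groupby pass over maximal same-classification runs: a punctuation run is extended char-by-char into the output, a non-punctuation run is joined into one token.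
import Mathlib
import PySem

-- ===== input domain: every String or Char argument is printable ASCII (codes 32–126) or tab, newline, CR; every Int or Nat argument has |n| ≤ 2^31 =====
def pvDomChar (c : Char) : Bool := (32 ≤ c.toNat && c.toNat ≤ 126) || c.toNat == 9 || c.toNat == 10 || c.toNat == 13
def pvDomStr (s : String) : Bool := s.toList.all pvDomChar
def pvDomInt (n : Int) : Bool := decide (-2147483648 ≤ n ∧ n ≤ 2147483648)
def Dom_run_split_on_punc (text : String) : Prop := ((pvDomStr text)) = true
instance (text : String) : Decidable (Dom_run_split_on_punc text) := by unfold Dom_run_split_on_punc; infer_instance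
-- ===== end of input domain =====

-- B replaces A's index loop with start_new_word state by an itertools.groupby pass over
-- maximal same-classification runs (objective: idiomatic/alternative; same O(n) cost).

-- ===== PORT A =====
-- _is_punctuation: the ASCII range checks; the unicodedata.category fallback never fires
-- on Dom's charset (printable ASCII + tab/newline/CR), so this is exact on Dom.
def pyIsPunctuation (c : Char) : Bool :=
  (33 ≤ c.toNat && c.toNat ≤ 47) || (58 ≤ c.toNat && c.toNat ≤ 64) ||
  (91 ≤ c.toNat && c.toNat ≤ 96) || (123 ≤ c.toNat && c.toNat ≤ 126)

-- output[-1].append(char): append char to the last sublist (A's loop never calls it on [])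
def pvAppendLast : List (List Char) → Char → List (List Char)
  | [], _ => []
  | [w], c => [w ++ [c]]
  | w :: ws, c => w :: pvAppendLast ws c

-- the while-loop of A over the remaining chars, with state (start_new_word, output)
def pvLoopA : List Char → Bool → List (List Char) → List (List Char)
  | [], _, out => out
  | c :: rest, snw, out =>
    if pyIsPunctuation c then
      pvLoopA rest true (out ++ [[c]])
    else
      pvLoopA rest false (pvAppendLast (if snw then out ++ [[]] else out) c)

def run_split_on_punc (text : String) : List String :=
  (pvLoopA text.toList true []).map (fun x => String.mk x)

-- ===== PORT B =====
-- itertools.groupby(text, key=_is_punctuation): maximal runs of same-classification chars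
def pvRuns : List Char → List (Bool × List Char)
  | [] => []
  | c :: rest =>
    let k := pyIsPunctuation c
    (k, c :: rest.takeWhile (fun d => pyIsPunctuation d == k)) ::
      pvRuns (rest.dropWhile (fun d => pyIsPunctuation d == k))
  termination_by l => l.length
  decreasing_by
    simpa using Nat.lt_succ_of_le (List.length_dropWhile_le _ _)

def run_split_on_punc_alt (text : String) : List String :=
  (pvRuns text.toList).foldl
    (fun output g =>
      if g.1 then output ++ g.2.map (fun c => String.mk [c])  -- output.extend(run)
      else output ++ [String.mk g.2])                          -- output.append("".join(run))
    []

-- ===== PRECONDITION & SPEC =====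
def Spec_run_split_on_punc (text : String) (out : List String) : Prop := out = run_split_on_punc_alt text
instance (text : String) (out : List String) : Decidable (Spec_run_split_on_punc text out) := by unfold Spec_run_split_on_punc; infer_instance

-- ===== CLAIM (what is proved, stated in full; the proofs are below) =====
def Claim_equal_run_split_on_punc : Prop := ∀ (text : String), Dom_run_split_on_punc text → Spec_run_split_on_punc text (run_split_on_punc text)

-- ===== LEMMAS AND PROOFS =====

-- common specification: the token lists, one punctuation char or one maximal word run at a time
def pvSpec : List Char → List (List Char)
  | [] => []
  | c :: rest =>
    if pyIsPunctuation c then [c] :: pvSpec rest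
    else (c :: rest.takeWhile (fun d => !pyIsPunctuation d)) ::
           pvSpec (rest.dropWhile (fun d => !pyIsPunctuation d))
  termination_by l => l.length
  decreasing_by
    all_goals simp
    exact List.length_dropWhile_le _ _

theorem pvAppendLast_append (out : List (List Char)) (w : List Char) (c : Char) :
    pvAppendLast (out ++ [w]) c = out ++ [w ++ [c]] := by
  induction out with
  | nil => rfl
  | cons x xs ih =>
    cases xs with
    | nil => simp [pvAppendLast]
    | cons y ys => simpa [pvAppendLast] using ih

-- A's loop computes pvSpec (both loop states, proved together by structural induction)
theorem pvLoopA_spec (chars : List Char) :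
    (∀ out, pvLoopA chars true out = out ++ pvSpec chars) ∧
    (∀ out w, pvLoopA chars false (out ++ [w]) =
      out ++ (w ++ chars.takeWhile (fun d => !pyIsPunctuation d)) ::
        pvSpec (chars.dropWhile (fun d => !pyIsPunctuation d))) := by
  induction chars with
  | nil =>
    exact ⟨fun out => by simp [pvLoopA, pvSpec],
           fun out w => by simp [pvLoopA, pvSpec]⟩
  | cons c rest ih =>
    refine ⟨fun out => ?_, fun out w => ?_⟩
    · by_cases h : pyIsPunctuation c = true
      · have step : pvLoopA (c :: rest) true out = pvLoopA rest true (out ++ [[c]]) := by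
          simp [pvLoopA, h]
        rw [step, ih.1]
        simp [pvSpec, h]
      · have h' : pyIsPunctuation c = false := by simpa using h
        have step : pvLoopA (c :: rest) true out = pvLoopA rest false (out ++ [[c]]) := by
          simp [pvLoopA, h', pvAppendLast_append]
        rw [step, ih.2 out [c]]
        simp [pvSpec, h']
    · by_cases h : pyIsPunctuation c = true
      · have step : pvLoopA (c :: rest) false (out ++ [w]) =
            pvLoopA rest true (out ++ [w] ++ [[c]]) := by
          simp [pvLoopA, h]
        rw [step, List.append_assoc, ih.1]
        simp [pvSpec, h]
      · have h' : pyIsPunctuation c = false := by simpa using h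
        have step : pvLoopA (c :: rest) false (out ++ [w]) =
            pvLoopA rest false (out ++ [w ++ [c]]) := by
          simp [pvLoopA, h', pvAppendLast_append]
        rw [step, ih.2 out (w ++ [c])]
        simp [h']

theorem pvSpec_punct_run (g rest : List Char) (hg : ∀ d ∈ g, pyIsPunctuation d = true) :
    pvSpec (g ++ rest) = g.map (fun c => [c]) ++ pvSpec rest := by
  induction g with
  | nil => simp
  | cons d ds ih =>
    have hd : pyIsPunctuation d = true := hg d (by simp)
    simp only [List.cons_append, pvSpec, hd, if_pos, List.map_cons, List.cons_append]
    rw [ih (fun e he => hg e (by simp [he]))]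

-- B's run decomposition also computes pvSpec
theorem pvRuns_spec (chars : List Char) :
    (pvRuns chars).flatMap
      (fun g => if g.1 then g.2.map (fun c => [c]) else [g.2]) = pvSpec chars := by
  match chars with
  | [] => simp [pvRuns, pvSpec]
  | c :: rest =>
    by_cases h : pyIsPunctuation c = true
    · simp only [pvRuns, h, List.flatMap_cons, if_pos, pvSpec]
      rw [pvRuns_spec (rest.dropWhile (fun d => pyIsPunctuation d == true))]
      have hsplit : rest = rest.takeWhile (fun d => pyIsPunctuation d == true) ++
          rest.dropWhile (fun d => pyIsPunctuation d == true) :=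
        (List.takeWhile_append_dropWhile).symm
      conv_rhs => rw [hsplit]
      rw [pvSpec_punct_run _ _ (fun d hd => by
        have := List.mem_takeWhile_imp hd; simpa using this)]
      simp
    · have h' : pyIsPunctuation c = false := by simpa using h
      have hpred : (fun d => pyIsPunctuation d == false) = (fun d => !pyIsPunctuation d) := by
        funext d; cases pyIsPunctuation d <;> rfl
      simp only [pvRuns, h', List.flatMap_cons, pvSpec, hpred]
      rw [pvRuns_spec (rest.dropWhile (fun d => !pyIsPunctuation d))]
      simp
  termination_by chars.length
  decreasing_by
    all_goals simpa using Nat.lt_succ_of_le (List.length_dropWhile_le _ _)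

-- B's foldl with two append branches, unrolled to a flatMap
theorem pvFoldB (l : List (Bool × List Char)) (acc : List String) :
    l.foldl (fun output g =>
        if g.1 then output ++ g.2.map (fun c => String.mk [c])
        else output ++ [String.mk g.2]) acc
      = acc ++ l.flatMap (fun g =>
          if g.1 then g.2.map (fun c => String.mk [c]) else [String.mk g.2]) := by
  induction l generalizing acc with
  | nil => simp
  | cons g gs ih =>
    by_cases hg : g.1 = true <;> simp [hg, ih]

-- ===== VERDICT (by name: the statement is the Claim_ definition above) =====
theorem run_split_on_punc_spec : Claim_equal_run_split_on_punc := by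
  intro text _
  unfold Spec_run_split_on_punc run_split_on_punc run_split_on_punc_alt
  rw [(pvLoopA_spec text.toList).1 [], List.nil_append, pvFoldB, List.nil_append,
    ← pvRuns_spec text.toList, List.map_flatMap]
  congr 1
  funext g
  by_cases hg : g.1 = true <;> simp [hg]
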